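-- pv_equiv track=rewrite | github.com/cylestio/cylestio-perimeter | src/proxy/session/manager.py | _get_messages_without_last_exchange
-- ===== SOURCE A (Python) =====
-- from typing import Any, Dict, List, Optional, Tuple
--
-- def _get_messages_without_last_exchange(messages: List[Dict[str, Any]]) -> List[Dict[str, Any]]:
--     """Get messages without the last user-assistant exchange.
--
--     Args:
--         messages: List of messages
--
--     Returns:
--         Messages without the last exchange
--     """
--     if len(messages) <= 2:
--         return []
--
--     # Find the second-to-last user message index
--     user_indices = []
--     for i, msg in enumerate(messages):
--         if msg.get('role') == 'user':
--             user_indices.append(i)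
--
--     if len(user_indices) < 2:
--         # If there's only one user message, return empty
--         return []
--
--     # Get the second-to-last user message index
--     cutoff_index = user_indices[-2]
--
--     # Return all messages up to and including that user message
--     return messages[:cutoff_index + 1]
-- ===== SOURCE B (Python) =====
-- def _get_messages_without_last_exchange(messages):
--     """Get messages without the last user-assistant exchange (reverse scan)."""
--     if len(messages) <= 2:
--         return []
--     seen = 0
--     kept = len(messages)  # prefix length still kept if the cutoff is here
--     for msg in reversed(messages):
--         if msg.get('role') == 'user':
--             seen += 1
--             if seen == 2:
--                 return messages[:kept]
--         kept -= 1
--     return []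
-- ===== Notes on version B (the rewrite author's own statement) =====
-- stated objective: alternative
-- what changed: Instead of building the full list of user-message indices in a forward pass and then slicing at user_indices[-2], B scans the messages once from the end with a counter and cuts as soon as the second user message is seen, never touching messages before the cutoff.
import Mathlib
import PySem

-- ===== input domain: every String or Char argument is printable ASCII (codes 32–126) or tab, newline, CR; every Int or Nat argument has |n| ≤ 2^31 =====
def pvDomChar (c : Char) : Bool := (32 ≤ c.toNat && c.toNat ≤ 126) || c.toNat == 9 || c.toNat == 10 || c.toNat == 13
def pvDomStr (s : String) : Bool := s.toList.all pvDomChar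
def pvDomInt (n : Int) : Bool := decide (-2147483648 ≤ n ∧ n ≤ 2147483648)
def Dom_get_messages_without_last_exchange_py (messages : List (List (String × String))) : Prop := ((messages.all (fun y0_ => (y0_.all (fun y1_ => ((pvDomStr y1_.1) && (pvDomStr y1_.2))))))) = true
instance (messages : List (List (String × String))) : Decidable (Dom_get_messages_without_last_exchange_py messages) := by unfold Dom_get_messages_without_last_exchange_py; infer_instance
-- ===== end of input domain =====

-- B scans the messages once from the end, stopping at the second user message,
-- instead of building the full table of user indices; same return value, different decomposition.

-- msg.get('role') == 'user'  (dict = association list, first match)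
def pvIsUser (m : List (String × String)) : Bool := m.lookup "role" == some "user"

-- ===== PORT A =====
def get_messages_without_last_exchange_py (messages : List (List (String × String))) : List (List (String × String)) :=
  if messages.length ≤ 2 then []
  else
    -- user_indices built by the enumerate loop
    let user_indices : List Int :=
      (PySem.List.enumerate messages).foldl
        (fun acc im => if pvIsUser im.2 then acc ++ [im.1] else acc) []
    if user_indices.length < 2 then []
    else
      match PySem.List.pyGet? user_indices (-2) with    -- user_indices[-2]
      | some cutoff => PySem.List.slice messages none (some (cutoff + 1))  -- messages[:cutoff+1]
      | none => []  -- unreachable: length ≥ 2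

-- ===== PORT B =====
-- for msg in reversed(messages): count user messages, cut as soon as the second is seen
def pvAltGo (orig : List (List (String × String))) :
    List (List (String × String)) → Nat → Nat → List (List (String × String))
  | [], _, _ => []
  | m :: rest, kept, seen =>
    if pvIsUser m then
      if seen + 1 == 2 then orig.take kept           -- messages[:kept]
      else pvAltGo orig rest (kept - 1) (seen + 1)
    else pvAltGo orig rest (kept - 1) seen

def get_messages_without_last_exchange_py_alt (messages : List (List (String × String))) : List (List (String × String)) :=
  if messages.length ≤ 2 then []
  else pvAltGo messages messages.reverse messages.length 0

-- ===== PRECONDITION & SPEC =====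
def Spec_get_messages_without_last_exchange_py (messages : List (List (String × String))) (out : List (List (String × String))) : Prop := out = get_messages_without_last_exchange_py_alt messages
instance (messages : List (List (String × String))) (out : List (List (String × String))) : Decidable (Spec_get_messages_without_last_exchange_py messages out) := by unfold Spec_get_messages_without_last_exchange_py; infer_instance

-- ===== CLAIM (what is proved, stated in full; the proofs are below) =====
def Claim_equal_get_messages_without_last_exchange_py : Prop := ∀ (messages : List (List (String × String))), Dom_get_messages_without_last_exchange_py messages → Spec_get_messages_without_last_exchange_py messages (get_messages_without_last_exchange_py messages)

-- ===== LEMMAS AND PROOFS =====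

-- Indices (ascending, as Nat) of user messages in a list: the reference object both ports are related to.
def pvUIdx : List (List (String × String)) → List Nat
  | [] => []
  | m :: t => (if pvIsUser m then [0] else []) ++ (pvUIdx t).map (· + 1)

theorem pvUIdx_lt {l : List (List (String × String))} {i : Nat} (h : i ∈ pvUIdx l) : i < l.length := by
  induction l generalizing i with
  | nil => simp [pvUIdx] at h
  | cons m t ih =>
    simp only [pvUIdx, List.mem_append, List.mem_map] at h
    rcases h with h | ⟨j, hj, rfl⟩
    · split at h
      · simp at h; simp [h]
      · simp at h
    · have := ih hj; simp; omega

theorem pvUIdx_append (l : List (List (String × String))) (m : List (String × String)) :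
    pvUIdx (l ++ [m]) = pvUIdx l ++ (if pvIsUser m then [l.length] else []) := by
  induction l with
  | nil => by_cases hm : pvIsUser m <;> simp [pvUIdx, hm]
  | cons x t ih =>
    simp only [List.cons_append, pvUIdx, ih, List.map_append]
    by_cases hm : pvIsUser m <;> simp [hm, List.append_assoc]

theorem pvUIdx_reverse (l : List (List (String × String))) :
    pvUIdx l.reverse = ((pvUIdx l).map (fun i : Nat => l.length - 1 - i)).reverse := by
  induction l with
  | nil => simp [pvUIdx]
  | cons m t ih =>
    simp only [List.reverse_cons, pvUIdx_append, ih, pvUIdx, List.map_append, List.map_map,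
      List.reverse_append]
    have : (fun i : Nat => t.length + 1 - 1 - i) ∘ (· + 1) = fun i : Nat => t.length - 1 - i := by
      funext i; simp; omega
    simp only [List.length_cons, this]
    split <;> simp

-- A's enumerate/append loop computes exactly pvUIdx (shifted by the enumerate start).
theorem pvFoldl_enumerate (l : List (List (String × String))) (s : Int) (acc : List Int) :
    (PySem.List.enumerate l s).foldl
        (fun acc im => if pvIsUser im.2 then acc ++ [im.1] else acc) acc
      = acc ++ (pvUIdx l).map (fun i : Nat => s + (i : Int)) := by
  induction l generalizing s acc with
  | nil => simp [PySem.List.enumerate_nil, pvUIdx]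
  | cons m t ih =>
    rw [PySem.List.enumerate_cons, List.foldl_cons, ih]
    have hmap : (pvUIdx t).map ((fun i : Nat => s + (i : Int)) ∘ (· + 1))
        = (pvUIdx t).map (fun i : Nat => (s + 1) + (i : Int)) := by
      apply List.map_congr_left; intro i _; simp; ring
    simp only [pvUIdx, List.map_append, List.map_map, hmap]
    by_cases hm : pvIsUser m <;> simp [hm, List.append_assoc]

-- B's reverse scan, characterised by the (2 - seen)-th user index of the scanned list.
theorem pvAltGo_eq (rev orig : List (List (String × String))) (kept seen : Nat) (h : seen < 2) :
    pvAltGo orig rev kept seen =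
      match (pvUIdx rev)[1 - seen]? with
      | some j => orig.take (kept - j)
      | none => [] := by
  induction rev generalizing kept seen with
  | nil => simp [pvAltGo, pvUIdx]
  | cons m rest ih =>
    simp only [pvAltGo, pvUIdx]
    by_cases hu : pvIsUser m
    · simp only [hu, if_true]
      interval_cases seen
      · rw [if_neg (by decide)]
        rw [ih _ 1 (by omega)]
        simp only [Nat.sub_self, List.getElem?_cons_succ, Nat.sub_zero, List.getElem?_map,
          List.singleton_append]
        cases hj : (pvUIdx rest)[0]? with
        | none => simp
        | some j => simp; congr 1; omega
      · simp
    · simp only [hu, if_false, Bool.false_eq_true, List.nil_append]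
      rw [ih _ seen h]
      simp only [List.getElem?_map]
      cases hj : (pvUIdx rest)[1 - seen]? with
      | none => simp
      | some j => simp; congr 1; omega

-- ===== VERDICT (by name: the statement is the Claim_ definition above) =====
theorem get_messages_without_last_exchange_py_spec : Claim_equal_get_messages_without_last_exchange_py := by
  intro messages _
  unfold Spec_get_messages_without_last_exchange_py
  unfold get_messages_without_last_exchange_py get_messages_without_last_exchange_py_alt
  by_cases hn : messages.length ≤ 2
  · simp [hn]
  · simp only [hn, if_false]
    rw [pvAltGo_eq _ _ _ _ (by omega), pvUIdx_reverse]
    rw [pvFoldl_enumerate messages 0 []]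
    rw [List.nil_append]
    set u := pvUIdx messages with hu
    set n := messages.length with hnn
    have hlen : (u.map (fun i : Nat => (0 : Int) + (i : Int))).length = u.length := by simp
    by_cases hk : u.length < 2
    · -- fewer than two user messages: both return []
      have hnone : ((u.map (fun i : Nat => n - 1 - i)).reverse)[1 - 0]? = none := by
        rw [List.getElem?_eq_none]
        simp; omega
      rw [if_pos (by omega), hnone]
    · rw [if_neg (by omega)]
      have hk2 : 2 ≤ u.length := by omega
      have hidx : u.length - 2 < u.length := by omega
      -- A's side: user_indices[-2]
      rw [PySem.List.pyGet?_neg_ofNat _ 2 (by omega) (by omega)]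
      have hA : (u.map (fun i : Nat => (0 : Int) + (i : Int)))[(u.map (fun i : Nat => (0 : Int) + (i : Int))).length - 2]?
          = some ((u[u.length - 2]'hidx : Nat) : Int) := by
        rw [hlen, List.getElem?_map, List.getElem?_eq_getElem hidx]
        simp
      rw [hA]
      -- B's side: second user index from the end
      have h11 : u.length - 1 - 1 = u.length - 2 := by omega
      have hrev : ((u.map (fun i : Nat => n - 1 - i)).reverse)[1 - 0]? = some (n - 1 - u[u.length - 2]'hidx) := by
        rw [List.getElem?_reverse (by simp; omega)]
        simp only [List.length_map, Nat.sub_zero, h11]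
        rw [List.getElem?_map, List.getElem?_eq_getElem hidx]
        rfl
      rw [hrev]
      dsimp only
      have hb : u[u.length - 2]'hidx < n := pvUIdx_lt (List.getElem_mem hidx)
      have hcut : n - (n - 1 - u[u.length - 2]'hidx) = u[u.length - 2]'hidx + 1 := by omega
      rw [hcut]
      rw [show ((u[u.length - 2]'hidx : Nat) : Int) + 1 = ((u[u.length - 2]'hidx + 1 : Nat) : Int) by push_cast; ring]
      rw [PySem.List.slice_to_natCast]
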